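-- pv_equiv track=rewrite | github.com/Marcela20/master_thesis_2 | heat_map_wij.py | order_codons
-- ===== SOURCE A (Python) =====
-- def order_codons(codons_list):
--     c_ending = []
--     g_ending = []
--     a_ending = []
--     t_ending = []
--
--     for i in codons_list:
--
--         if i[-1] == "C":
--             c_ending.append(i)
--         if i[-1] == "G":
--             g_ending.append(i)
--         if i[-1] == "A":
--             a_ending.append(i)
--         if i[-1] == "T":
--             t_ending.append(i)
--     list_of_all = c_ending[::-1] + g_ending[::-1] + a_ending[::-1] + t_ending[::-1]
--     return list_of_all
-- ===== SOURCE B (Python) =====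
-- def order_codons(codons_list):
--     # Single stable sort instead of four accumulator buckets:
--     # keep codons ending in a base, reverse once, then stable-sort by base rank.
--     order = {"C": 0, "G": 1, "A": 2, "T": 3}
--     kept = [c for c in codons_list if c[-1] in order]
--     return sorted(reversed(kept), key=lambda c: order[c[-1]])
-- ===== Notes on version B (the rewrite author's own statement) =====
-- stated objective: alternative
-- what changed: Replaces the four per-base accumulator lists (appended in a loop, then each reversed and concatenated) by one filtered reversal followed by a single stable sort keyed on the rank of the last base, whose stability reproduces A's per-bucket reversal and whose key order reproduces the C,G,A,T concatenation.
import Mathlib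
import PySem

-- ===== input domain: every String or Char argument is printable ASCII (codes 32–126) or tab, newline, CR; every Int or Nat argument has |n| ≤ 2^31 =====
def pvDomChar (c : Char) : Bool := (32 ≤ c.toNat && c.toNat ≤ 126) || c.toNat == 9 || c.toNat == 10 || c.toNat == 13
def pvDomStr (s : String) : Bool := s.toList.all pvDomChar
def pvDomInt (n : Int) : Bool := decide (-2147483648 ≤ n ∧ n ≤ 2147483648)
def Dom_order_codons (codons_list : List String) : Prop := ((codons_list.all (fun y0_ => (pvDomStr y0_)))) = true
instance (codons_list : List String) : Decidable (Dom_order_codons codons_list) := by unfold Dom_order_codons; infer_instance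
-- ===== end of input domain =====

-- B replaces A's four accumulator buckets by one filter + reversal + stable sort keyed on base rank; alternative decomposition, not claimed faster.


-- ===== PORT A =====
def order_codons (codons_list : List String) : List String :=
  let r := codons_list.foldl
    (fun (acc : List String × List String × List String × List String) i =>
      let ch : Char := (PySem.Str.pyGet? i (-1)).getD ' '
      let c := if ch = 'C' then acc.1 ++ [i] else acc.1
      let g := if ch = 'G' then acc.2.1 ++ [i] else acc.2.1
      let a := if ch = 'A' then acc.2.2.1 ++ [i] else acc.2.2.1
      let t := if ch = 'T' then acc.2.2.2 ++ [i] else acc.2.2.2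
      (c, g, a, t))
    ([], [], [], [])
  ((PySem.List.slice? r.1 none none (-1)).getD []) ++
  ((PySem.List.slice? r.2.1 none none (-1)).getD []) ++
  ((PySem.List.slice? r.2.2.1 none none (-1)).getD []) ++
  ((PySem.List.slice? r.2.2.2 none none (-1)).getD [])

-- ===== PORT B =====
-- c[-1] (total form; Python raises on "", excluded by Pre_)
def pvLast (c : String) : Char := (PySem.Str.pyGet? c (-1)).getD ' '
-- order[c[-1]] for the literal dict {"C":0,"G":1,"A":2,"T":3} (only applied to kept codons)
def pvKey (c : String) : Int :=
  if pvLast c = 'C' then 0 else if pvLast c = 'G' then 1 else if pvLast c = 'A' then 2 else 3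
def order_codons_alt (codons_list : List String) : List String :=
  let kept := codons_list.filter (fun c => (['C', 'G', 'A', 'T'] : List Char).contains (pvLast c))
  PySem.List.sorted kept.reverse (fun c => pvKey c) false

-- ===== PRECONDITION & SPEC =====
-- Pre_ excludes exactly the lists containing an empty string: there both Pythons raise IndexError on c[-1].
def Pre_order_codons (codons_list : List String) : Prop := ∀ s ∈ codons_list, s.toList ≠ []
instance (codons_list : List String) : Decidable (Pre_order_codons codons_list) := by
  unfold Pre_order_codons; infer_instance
def pvWitness_order_codons : List String := ["AAC", "GT", "TGA", "CCT", "AG", "xyz"]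
def Spec_order_codons (codons_list : List String) (out : List String) : Prop := out = order_codons_alt codons_list
instance (codons_list : List String) (out : List String) : Decidable (Spec_order_codons codons_list out) := by unfold Spec_order_codons; infer_instance

-- ===== CLAIM (what is proved, stated in full; the proofs are below) =====
def Claim_equal_order_codons : Prop := ∀ (codons_list : List String), Dom_order_codons codons_list → Pre_order_codons codons_list → Spec_order_codons codons_list (order_codons codons_list)

-- ===== LEMMAS AND PROOFS =====

-- insertBy skips a prefix it must not go before, then lands in front of a suffix it must go before
theorem pv_insertBy_skip {α : Type} (bf : α → α → Bool) (x : α) (l1 l2 : List α)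
    (h : ∀ y ∈ l1, bf x y = false) :
    PySem.List.insertBy bf x (l1 ++ l2) = l1 ++ PySem.List.insertBy bf x l2 := by
  induction l1 with
  | nil => simp
  | cons z zs ih =>
    simp only [List.cons_append, PySem.List.insertBy, h z (by simp)]
    simp [ih (fun y hy => h y (by simp [hy]))]

theorem pv_insertBy_mid {α : Type} (bf : α → α → Bool) (x : α) (l1 l2 : List α)
    (h1 : ∀ y ∈ l1, bf x y = false) (h2 : ∀ y ∈ l2, bf x y = true) :
    PySem.List.insertBy bf x (l1 ++ l2) = l1 ++ x :: l2 := by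
  rw [pv_insertBy_skip bf x l1 l2 h1]
  cases l2 with
  | nil => simp [PySem.List.insertBy]
  | cons z zs => simp [PySem.List.insertBy, h2 z (by simp)]

theorem pvKey_range (c : String) : pvKey c = 0 ∨ pvKey c = 1 ∨ pvKey c = 2 ∨ pvKey c = 3 := by
  unfold pvKey; split_ifs <;> simp

-- the stable insertion sort over the 4-valued key is the concatenation of the key-filtered sublists
theorem pv_foldl_buckets (xs g0 g1 g2 g3 : List String)
    (h0 : ∀ y ∈ g0, pvKey y = 0) (h1 : ∀ y ∈ g1, pvKey y = 1)
    (h2 : ∀ y ∈ g2, pvKey y = 2) (h3 : ∀ y ∈ g3, pvKey y = 3) :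
    xs.foldl (fun acc x => PySem.List.insertBy (fun a b => decide (pvKey a < pvKey b)) x acc)
        (g0 ++ g1 ++ g2 ++ g3) =
      (g0 ++ xs.filter (fun x => pvKey x == 0)) ++ (g1 ++ xs.filter (fun x => pvKey x == 1)) ++
      (g2 ++ xs.filter (fun x => pvKey x == 2)) ++ (g3 ++ xs.filter (fun x => pvKey x == 3)) := by
  induction xs generalizing g0 g1 g2 g3 with
  | nil => simp
  | cons x xs ih =>
    simp only [List.foldl_cons, List.filter_cons]
    rcases pvKey_range x with hx | hx | hx | hx
    · rw [show g0 ++ g1 ++ g2 ++ g3 = g0 ++ (g1 ++ g2 ++ g3) by simp,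
        pv_insertBy_mid _ x g0 (g1 ++ g2 ++ g3)
          (fun y hy => by
            simp only [decide_eq_false_iff_not, not_lt]
            have := h0 y hy; omega)
          (fun y hy => by
            simp only [List.mem_append] at hy
            simp only [decide_eq_true_eq]
            rcases hy with (hy | hy) | hy
            · have := h1 y hy; omega
            · have := h2 y hy; omega
            · have := h3 y hy; omega),
        show g0 ++ x :: (g1 ++ g2 ++ g3) = (g0 ++ [x]) ++ g1 ++ g2 ++ g3 by simp,
        ih (g0 ++ [x]) g1 g2 g3
          (fun y hy => by
            rcases List.mem_append.1 hy with hy | hy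
            · exact h0 y hy
            · simp at hy; simpa [hy] using hx)
          h1 h2 h3]
      simp [hx]
    · rw [show g0 ++ g1 ++ g2 ++ g3 = (g0 ++ g1) ++ (g2 ++ g3) by simp,
        pv_insertBy_mid _ x (g0 ++ g1) (g2 ++ g3)
          (fun y hy => by
            simp only [List.mem_append] at hy
            simp only [decide_eq_false_iff_not, not_lt]
            rcases hy with hy | hy
            · have := h0 y hy; omega
            · have := h1 y hy; omega)
          (fun y hy => by
            simp only [List.mem_append] at hy
            simp only [decide_eq_true_eq]
            rcases hy with hy | hy
            · have := h2 y hy; omega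
            · have := h3 y hy; omega),
        show (g0 ++ g1) ++ x :: (g2 ++ g3) = g0 ++ (g1 ++ [x]) ++ g2 ++ g3 by simp,
        ih g0 (g1 ++ [x]) g2 g3 h0
          (fun y hy => by
            rcases List.mem_append.1 hy with hy | hy
            · exact h1 y hy
            · simp at hy; simpa [hy] using hx)
          h2 h3]
      simp [hx]
    · rw [show g0 ++ g1 ++ g2 ++ g3 = (g0 ++ g1 ++ g2) ++ g3 by simp,
        pv_insertBy_mid _ x (g0 ++ g1 ++ g2) g3
          (fun y hy => by
            simp only [List.mem_append] at hy
            simp only [decide_eq_false_iff_not, not_lt]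
            rcases hy with (hy | hy) | hy
            · have := h0 y hy; omega
            · have := h1 y hy; omega
            · have := h2 y hy; omega)
          (fun y hy => by
            simp only [decide_eq_true_eq]
            have := h3 y hy; omega),
        show (g0 ++ g1 ++ g2) ++ x :: g3 = g0 ++ g1 ++ (g2 ++ [x]) ++ g3 by simp,
        ih g0 g1 (g2 ++ [x]) g3 h0 h1
          (fun y hy => by
            rcases List.mem_append.1 hy with hy | hy
            · exact h2 y hy
            · simp at hy; simpa [hy] using hx)
          h3]
      simp [hx]
    · rw [show g0 ++ g1 ++ g2 ++ g3 = (g0 ++ g1 ++ g2 ++ g3) ++ [] by simp,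
        pv_insertBy_mid _ x (g0 ++ g1 ++ g2 ++ g3) []
          (fun y hy => by
            simp only [List.mem_append] at hy
            simp only [decide_eq_false_iff_not, not_lt]
            rcases hy with ((hy | hy) | hy) | hy
            · have := h0 y hy; omega
            · have := h1 y hy; omega
            · have := h2 y hy; omega
            · have := h3 y hy; omega)
          (by simp),
        show (g0 ++ g1 ++ g2 ++ g3) ++ [x] = g0 ++ g1 ++ g2 ++ (g3 ++ [x]) by simp,
        ih g0 g1 g2 (g3 ++ [x]) h0 h1 h2
          (fun y hy => by
            rcases List.mem_append.1 hy with hy | hy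
            · exact h3 y hy
            · simp at hy; simpa [hy] using hx)]
      simp [hx]

theorem pv_sorted_eq (xs : List String) :
    PySem.List.sorted xs (fun c => pvKey c) false =
      xs.filter (fun x => pvKey x == 0) ++ xs.filter (fun x => pvKey x == 1) ++
      xs.filter (fun x => pvKey x == 2) ++ xs.filter (fun x => pvKey x == 3) := by
  have := pv_foldl_buckets xs [] [] [] [] (by simp) (by simp) (by simp) (by simp)
  simpa [PySem.List.sorted] using this

-- A's accumulator loop builds the four filtered bucket lists
theorem pv_A_buckets (xs : List String) (c g a t : List String) :
    xs.foldl
      (fun (acc : List String × List String × List String × List String) i =>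
        let ch : Char := (PySem.Str.pyGet? i (-1)).getD ' '
        let c := if ch = 'C' then acc.1 ++ [i] else acc.1
        let g := if ch = 'G' then acc.2.1 ++ [i] else acc.2.1
        let a := if ch = 'A' then acc.2.2.1 ++ [i] else acc.2.2.1
        let t := if ch = 'T' then acc.2.2.2 ++ [i] else acc.2.2.2
        (c, g, a, t)) (c, g, a, t) =
      (c ++ xs.filter (fun i => pvLast i == 'C'), g ++ xs.filter (fun i => pvLast i == 'G'),
       a ++ xs.filter (fun i => pvLast i == 'A'), t ++ xs.filter (fun i => pvLast i == 'T')) := by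
  induction xs generalizing c g a t with
  | nil => simp
  | cons x xs ih =>
    simp only [List.foldl_cons, List.filter_cons, ih, pvLast]
    by_cases hC : (PySem.Str.pyGet? x (-1)).getD ' ' = 'C' <;>
      by_cases hG : (PySem.Str.pyGet? x (-1)).getD ' ' = 'G' <;>
      by_cases hA : (PySem.Str.pyGet? x (-1)).getD ' ' = 'A' <;>
      by_cases hT : (PySem.Str.pyGet? x (-1)).getD ' ' = 'T' <;>
      simp_all

-- the B-side bucket filters coincide with the A-side last-letter filters
theorem pv_filter_eq (xs : List String) (ch : Char) (n : Int)
    (hk : ∀ c : String, (pvKey c = n ∧ (['C', 'G', 'A', 'T'] : List Char).contains (pvLast c)) ↔ pvLast c = ch) :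
    (xs.filter (fun c => (['C', 'G', 'A', 'T'] : List Char).contains (pvLast c))).filter
        (fun x => pvKey x == n) =
      xs.filter (fun i => pvLast i == ch) := by
  rw [List.filter_filter]
  apply List.filter_congr
  intro c _
  by_cases h1 : pvKey c = n
  · by_cases h2 : (['C', 'G', 'A', 'T'] : List Char).contains (pvLast c) = true
    · have hc := (hk c).1 ⟨h1, h2⟩
      rw [hc] at h2
      simp at h2
      rcases h2 with h | h | h | h <;> simp [h1, hc, h]
    · have hne : pvLast c ≠ ch := fun h => h2 (by exact_mod_cast ((hk c).2 h).2)
      simp only [Bool.not_eq_true] at h2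
      simp at h2
      obtain ⟨hA, hB, hC, hD⟩ := h2
      simp [hA, hB, hC, hD, hne]
  · have hne : pvLast c ≠ ch := fun h => h1 ((hk c).2 h).1
    rw [show (pvKey c == n) = false from beq_eq_false_iff_ne.2 h1,
      show (pvLast c == ch) = false from beq_eq_false_iff_ne.2 hne]
    simp

-- ===== VERDICT (by name: the statement is the Claim_ definition above) =====
theorem order_codons_spec : Claim_equal_order_codons := by
  intro codons_list _ _
  unfold Spec_order_codons order_codons order_codons_alt
  rw [pv_A_buckets]
  simp only [PySem.List.slice?_none_none_neg_one, Option.getD_some, List.nil_append]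
  rw [pv_sorted_eq]
  have e0 := pv_filter_eq codons_list 'C' 0 (by intro c; unfold pvKey; split_ifs <;> simp_all)
  have e1 := pv_filter_eq codons_list 'G' 1 (by intro c; unfold pvKey; split_ifs <;> simp_all)
  have e2 := pv_filter_eq codons_list 'A' 2 (by intro c; unfold pvKey; split_ifs <;> simp_all)
  have e3 := pv_filter_eq codons_list 'T' 3 (by intro c; unfold pvKey; split_ifs <;> simp_all)
  simp only [List.filter_reverse, e0, e1, e2, e3]
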